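-- pv_equiv track=rewrite | github.com/faksdal/plot-qcodes | plot-qcodes.py | parse_qcodes
-- ===== SOURCE A (Python) =====
-- ALL_QCODES = ["0", "1", "2", "3", "4", "5", "6", "7", "8", "9", "B", "D", "E", "F", "G", "H", "N", "-"]
--
-- _VALID_QCODE_SET = set(ALL_QCODES)
--
-- def parse_qcodes(raw: str) -> list[str]:
--     """
--     Parse a compact qcode string like '0123BD-' into an ordered list.
--     """
--
--     # Validate characters and preserve order without duplicates.
--     seen    : set[str]  = set()
--     result  : list[str] = []
--
--     # Parse the input string, validate against allowed qcodes, and build a list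
--     # of unique codes.
--     # The qcodes are case-insensitive, but we will store them in uppercase form.
--     for ch in raw.upper():
--         if ch not in _VALID_QCODE_SET:
--             raise SystemExit(
--                 f"Unknown qcode '{ch}'. Valid codes: {''.join(ALL_QCODES)}"
--             )
--         if ch not in seen:
--             seen.add(ch)
--             result.append(ch)
--
--     # If the result is empty, it means the input string had no valid qcodes.
--     if not result:
--         raise SystemExit("--qcodes string produced an empty list.")
--
--     # Preserve the canonical order from ALL_QCODES.
--     return [q for q in ALL_QCODES if q in seen]
-- ===== SOURCE B (Python) =====
-- ALL_QCODES = ["0", "1", "2", "3", "4", "5", "6", "7", "8", "9", "B", "D", "E", "F", "G", "H", "N", "-"]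
--
-- _VALID_QCODE_SET = set(ALL_QCODES)
--
-- def parse_qcodes(raw: str) -> list[str]:
--     """
--     Parse a compact qcode string like '0123BD-' into an ordered list.
--     """
--     upper = raw.upper()
--
--     # Validation pass: reject at the first character outside the valid set.
--     for ch in upper:
--         if ch not in _VALID_QCODE_SET:
--             raise SystemExit(
--                 f"Unknown qcode '{ch}'. Valid codes: {''.join(ALL_QCODES)}"
--             )
--
--     # All characters are valid; the distinct codes in one step.
--     present = set(upper)
--     if not present:
--         raise SystemExit("--qcodes string produced an empty list.")
--
--     # Canonical order = sort by position in the ALL_QCODES table.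
--     return sorted(present, key=ALL_QCODES.index)
-- ===== Notes on version B (the rewrite author's own statement) =====
-- stated objective: idiomatic
-- what changed: Validation becomes its own pass, the distinct codes come from set(upper) in one step instead of the first-seen loop, and the canonical order is produced by sorting with key=ALL_QCODES.index instead of filtering ALL_QCODES by membership.
import Mathlib
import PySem

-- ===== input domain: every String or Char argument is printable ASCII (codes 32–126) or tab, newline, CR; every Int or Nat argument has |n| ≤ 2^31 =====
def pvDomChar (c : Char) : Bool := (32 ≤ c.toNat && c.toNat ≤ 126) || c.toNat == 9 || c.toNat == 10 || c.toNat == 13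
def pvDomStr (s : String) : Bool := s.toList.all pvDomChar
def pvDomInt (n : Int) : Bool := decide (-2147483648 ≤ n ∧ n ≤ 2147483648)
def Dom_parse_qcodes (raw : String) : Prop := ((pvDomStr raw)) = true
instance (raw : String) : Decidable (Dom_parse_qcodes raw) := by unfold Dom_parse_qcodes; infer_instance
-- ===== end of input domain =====

-- B splits validation into its own pass, builds the set of codes in one step, and derives the
-- canonical order by sorting with key = ALL_QCODES.index instead of filtering ALL_QCODES (idiomatic).


-- ===== PORT A =====
def allQcodes : List String := ["0","1","2","3","4","5","6","7","8","9","B","D","E","F","G","H","N","-"]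

def validQcodeSet : PySem.Set String := PySem.Set.ofList allQcodes

-- one iteration of A's for-loop over (seen, result); the invalid branch is Python's raise (excluded by Pre_)
def pqStep (st : PySem.Set String × List String) (c : Char) : PySem.Set String × List String :=
  let ch := String.ofList [c]
  if ¬ PySem.Set.contains validQcodeSet ch then st  -- Python: raise SystemExit (outside Pre_)
  else if PySem.Set.contains st.1 ch then st
  else (PySem.Set.add st.1 ch, st.2 ++ [ch])

def parse_qcodes (raw : String) : List String :=
  let st := (PySem.Str.upper raw).toList.foldl pqStep (PySem.Set.empty, [])
  if st.2 = [] then []  -- Python: raise SystemExit (outside Pre_)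
  else allQcodes.filter (fun q => PySem.Set.contains st.1 q)

-- ===== PORT B =====
def parse_qcodes_alt (raw : String) : List String :=
  let upper := (PySem.Str.upper raw).toList.map (fun c => String.ofList [c])
  -- Source B's validation pass: the loop raises at the first invalid character (outside Pre_)
  if upper.any (fun ch => !(PySem.Set.contains validQcodeSet ch)) then []
  else
    let present : PySem.Set String := PySem.Set.ofList upper
    if present = [] then []  -- Python: raise SystemExit (outside Pre_)
    -- sorted(present, key=ALL_QCODES.index); .index never raises here since all codes validated
    else PySem.List.sorted present (fun q => allQcodes.findIdx (fun a => a == q)) false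

-- ===== PRECONDITION & SPEC =====
-- Pre_ excludes exactly the inputs on which A raises SystemExit: a character (after upper-casing)
-- outside the valid qcode set, or an empty input string.
def qchars : List Char := ['0','1','2','3','4','5','6','7','8','9','B','D','E','F','G','H','N','-']

def Pre_parse_qcodes (raw : String) : Prop :=
  raw.toList ≠ [] ∧ (PySem.Str.upper raw).toList.all (fun c => c ∈ qchars) = true
instance (raw : String) : Decidable (Pre_parse_qcodes raw) := by unfold Pre_parse_qcodes; infer_instance

def pvWitness_parse_qcodes : String := "b01-"

def Spec_parse_qcodes (raw : String) (out : List String) : Prop := out = parse_qcodes_alt raw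
instance (raw : String) (out : List String) : Decidable (Spec_parse_qcodes raw out) := by unfold Spec_parse_qcodes; infer_instance

-- ===== CLAIM (what is proved, stated in full; the proofs are below) =====
def Claim_equal_parse_qcodes : Prop := ∀ (raw : String), Dom_parse_qcodes raw → Pre_parse_qcodes raw → Spec_parse_qcodes raw (parse_qcodes raw)

-- ===== LEMMAS AND PROOFS =====

-- ALL_QCODES is the valid character list rendered as one-character strings
theorem allQcodes_eq : allQcodes = qchars.map (fun c => String.ofList [c]) := rfl

theorem sChr_inj (a c : Char) (h : String.ofList [a] = String.ofList [c]) : a = c := by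
  simpa using congrArg String.toList h

theorem sChr_beq (a c : Char) : (String.ofList [a] == String.ofList [c]) = (a == c) := by
  by_cases h : a = c
  · subst h; simp
  · have hne : String.ofList [a] ≠ String.ofList [c] := fun hh => h (sChr_inj a c hh)
    simp [h, hne]

theorem qchars_nodup : qchars.Nodup := by decide

theorem allQcodes_nodup : allQcodes.Nodup := by
  rw [allQcodes_eq]
  exact qchars_nodup.map (fun a c h => sChr_inj a c h)

-- every valid character, as a one-character string, is an element of ALL_QCODES
theorem qchars_sub : ∀ c ∈ qchars, String.ofList [c] ∈ allQcodes := by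
  intro c hc
  rw [allQcodes_eq]
  exact List.mem_map_of_mem hc

theorem qchars_pairwise : qchars.Pairwise
    (fun a b => qchars.findIdx (fun x => x == a) < qchars.findIdx (fun x => x == b)) := by
  decide

-- A's loop, when every character is valid, keeps seen = result, and both are set(chars so far)
theorem pqStep_fold_eq (cs : List Char) :
    ∀ s : PySem.Set String, (∀ c ∈ cs, String.ofList [c] ∈ allQcodes) →
    cs.foldl pqStep (s, s) =
      (PySem.Set.update s (cs.map (fun c => String.ofList [c])),
       PySem.Set.update s (cs.map (fun c => String.ofList [c]))) := by
  induction cs with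
  | nil => intro s _; simp [PySem.Set.update]
  | cons c cs ih =>
    intro s h
    have hc : String.ofList [c] ∈ allQcodes := h c (by simp)
    have hstep : pqStep (s, s) c = (PySem.Set.add s (String.ofList [c]), PySem.Set.add s (String.ofList [c])) := by
      simp only [pqStep, PySem.Set.add]
      have : PySem.Set.contains validQcodeSet (String.ofList [c]) = true := by
        simp [validQcodeSet, PySem.Set.mem_ofList, hc]
      split_ifs <;> simp_all
    simp only [List.foldl_cons, hstep, List.map_cons]
    rw [ih _ (fun x hx => h x (by simp [hx]))]
    simp [PySem.Set.update]

theorem allQcodes_pairwise_lt :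
    allQcodes.Pairwise (fun a b =>
      allQcodes.findIdx (fun x => x == a) < allQcodes.findIdx (fun x => x == b)) := by
  conv_lhs => rw [allQcodes_eq]
  rw [allQcodes_eq, List.pairwise_map]
  refine qchars_pairwise.imp ?_
  intro a b h
  rw [List.findIdx_map, List.findIdx_map]
  simpa [Function.comp_def, sChr_beq] using h

theorem parse_qcodes_spec : Claim_equal_parse_qcodes := by
  intro raw _ hpre
  obtain ⟨hne, hvalb⟩ := hpre
  have hval : ∀ c ∈ (PySem.Str.upper raw).toList, String.ofList [c] ∈ allQcodes := by
    intro c hc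
    exact qchars_sub c (of_decide_eq_true (List.all_eq_true.mp hvalb c hc))
  unfold Spec_parse_qcodes parse_qcodes parse_qcodes_alt
  set L := (PySem.Str.upper raw).toList with hL
  set ms : List String := L.map (fun c => String.ofList [c]) with hms
  have hmsval : ∀ q ∈ ms, q ∈ allQcodes := by
    intro q hq
    rw [hms] at hq
    obtain ⟨c, hc, rfl⟩ := List.mem_map.mp hq
    exact hval c hc
  have hLne : L ≠ [] := by
    rw [hL]
    simp only [ne_eq, pysem]
    intro h
    exact hne (List.map_eq_nil_iff.mp h)
  -- A's fold
  have hfold := pqStep_fold_eq L PySem.Set.empty (fun c hc => hval c hc)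
  have hupd : PySem.Set.update PySem.Set.empty ms = PySem.Set.ofList ms := by
    simp [PySem.Set.update, PySem.Set.ofList_eq_foldl, PySem.Set.empty]
  rw [hupd] at hfold
  simp only [PySem.Set.empty] at hfold ⊢
  rw [hfold]
  -- A's emptiness guard never fires
  have hmsne : ms ≠ [] := by
    rw [hms]; simpa using hLne
  have hofne : PySem.Set.ofList ms ≠ [] := by
    obtain ⟨a, ms', hcons⟩ := List.exists_cons_of_ne_nil hmsne
    rw [hcons]
    intro h
    have : a ∈ PySem.Set.ofList (a :: ms') := by
      rw [PySem.Set.mem_ofList]; simp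
    simp [h] at this
  -- B's validity guard never fires
  have hany : ms.any (fun ch => !(PySem.Set.contains validQcodeSet ch)) = false := by
    simp only [List.any_eq_false, Bool.not_eq_true']
    intro ch hch
    simp [validQcodeSet, PySem.Set.mem_ofList, hmsval ch hch]
  simp only [hany, Bool.false_eq_true, if_false, hofne]
  -- both sides now: filter vs sorted
  have hperm : (allQcodes.filter (fun q => PySem.Set.contains (PySem.Set.ofList ms) q)).Perm
      (PySem.Set.ofList ms) := by
    rw [List.perm_ext_iff_of_nodup (List.Nodup.filter _ allQcodes_nodup) (PySem.Set.nodup_ofList ms)]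
    intro q
    simp only [List.mem_filter, PySem.Set.contains_iff]
    constructor
    · rintro ⟨_, h2⟩; simpa using h2
    · intro h
      refine ⟨?_, by simpa using h⟩
      exact hmsval q ((PySem.Set.mem_ofList ms q).mp h)
  have hpw : (allQcodes.filter (fun q => PySem.Set.contains (PySem.Set.ofList ms) q)).Pairwise
      (fun a b => (fun q => allQcodes.findIdx (fun x => x == q)) a <
                  (fun q => allQcodes.findIdx (fun x => x == q)) b) :=
    allQcodes_pairwise_lt.sublist List.filter_sublist |>.imp (fun h => h)
  exact (PySem.List.sorted_eq_of_perm_of_pairwise_lt _ _ _ hperm hpw).symm
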